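-- pv_equiv track=rewrite | github.com/Duwo/advent_of_code | 4/password.py | filter_always_increasing_digits
-- ===== SOURCE A (Python) =====
-- def filter_always_increasing_digits(passwords):
--     filtered = []
--     for password in passwords:
--         password_str = str(password)
--         for i, digit in enumerate(password_str):
--             try:
--                 if password_str[i] > password_str[i+1]:
--                     break
--             except:
--                 filtered.append(password)
--
--     return filtered
-- ===== SOURCE B (Python) =====
-- def filter_always_increasing_digits(passwords):
--     return [p for p in passwords
--             if (s := str(p)) == ''.join(sorted(s))]
-- ===== Notes on version B (the rewrite author's own statement) =====
-- stated objective: idiomatic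
-- what changed: B replaces A's index-by-index adjacent scan with its try/except-IndexError append trick by a list comprehension keeping p when str(p) equals its sorted copy.
import Mathlib
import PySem

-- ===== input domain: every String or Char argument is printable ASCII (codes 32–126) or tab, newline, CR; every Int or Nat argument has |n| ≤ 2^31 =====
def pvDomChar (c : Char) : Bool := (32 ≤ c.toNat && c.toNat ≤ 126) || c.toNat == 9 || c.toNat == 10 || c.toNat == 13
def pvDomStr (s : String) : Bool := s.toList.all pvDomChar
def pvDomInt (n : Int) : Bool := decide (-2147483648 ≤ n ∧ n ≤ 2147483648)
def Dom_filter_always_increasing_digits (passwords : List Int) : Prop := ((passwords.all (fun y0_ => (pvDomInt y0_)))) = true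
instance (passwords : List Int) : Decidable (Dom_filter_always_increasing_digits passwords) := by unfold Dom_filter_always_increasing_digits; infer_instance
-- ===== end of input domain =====

-- ===== PORT A =====
-- B changes: keep p when str(p) equals its sorted copy, via a comprehension, instead of
-- A's indexed adjacent scan with the try/except-IndexError append trick (objective: idiomatic).

-- inner 'for i, digit in enumerate(password_str)' loop of A: returns true iff the loop
-- reaches the IndexError at i = len-1 (so the password gets appended), false on 'break'.
def pvScanA (s : List Char) (i : Nat) : Bool :=
  if _h : i < s.length then
    match PySem.List.pyGet? s ((i : Int) + 1) with
    | none => true              -- password_str[i+1] raises IndexError -> append; loop ends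
    | some nxt =>
      if PySem.List.pyGetD s (i : Int) ' ' > nxt then false   -- break
      else pvScanA s (i + 1)
  else false                    -- loop over without append (unreachable for nonempty s)
termination_by s.length - i

def filter_always_increasing_digits (passwords : List Int) : List Int :=
  passwords.foldl
    (fun filtered password =>
      if pvScanA (PySem.Int.toChars password) 0 then filtered ++ [password] else filtered)
    []

-- ===== PORT B =====
def filter_always_increasing_digits_alt (passwords : List Int) : List Int :=
  passwords.filter (fun p =>
    let s := PySem.Int.toChars p
    s == PySem.List.sorted s (fun c => c) false)

-- ===== PRECONDITION & SPEC =====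
def Spec_filter_always_increasing_digits (passwords : List Int) (out : List Int) : Prop := out = filter_always_increasing_digits_alt passwords
instance (passwords : List Int) (out : List Int) : Decidable (Spec_filter_always_increasing_digits passwords out) := by unfold Spec_filter_always_increasing_digits; infer_instance

-- ===== CLAIM (what is proved, stated in full; the proofs are below) =====
def Claim_equal_filter_always_increasing_digits : Prop := ∀ (passwords : List Int), Dom_filter_always_increasing_digits passwords → Spec_filter_always_increasing_digits passwords (filter_always_increasing_digits passwords)

-- ===== LEMMAS AND PROOFS =====

lemma toDigitsCore_ne_nil (b f n : Nat) (acc : List Char) (h : acc ≠ []) :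
    Nat.toDigitsCore b f n acc ≠ [] := by
  induction f generalizing n acc with
  | zero => simpa [Nat.toDigitsCore]
  | succ f ih =>
    simp only [Nat.toDigitsCore]
    split
    · simp
    · exact ih _ _ (by simp)

lemma toChars_ne_nil (n : Int) : PySem.Int.toChars n ≠ [] := by
  unfold PySem.Int.toChars
  split
  · simp
  · unfold Nat.toDigits
    simp only [Nat.toDigitsCore]
    split
    · simp
    · exact toDigitsCore_ne_nil _ _ _ _ (by simp)

-- A's inner scan succeeds iff no adjacent pair from index i on decreases.
lemma pvScanA_iff (s : List Char) (i : Nat) (hi : i < s.length) :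
    pvScanA s i = true ↔ ∀ j, i ≤ j → (hj : j + 1 < s.length) → s[j] ≤ s[j + 1] := by
  induction hfuel : s.length - i generalizing i with
  | zero => omega
  | succ m ih =>
    unfold pvScanA
    simp only [hi, dite_true]
    by_cases hnext : i + 1 < s.length
    · rw [show ((i : Int) + 1) = ((i + 1 : Nat) : Int) by push_cast; ring]
      rw [PySem.List.pyGet?_natCast, PySem.List.pyGetD_natCast,
        List.getElem?_eq_getElem hnext, List.getD_eq_getElem s ' ' hi]
      by_cases hgt : s[i + 1] < s[i]
      · simp only [hgt, if_pos]
        constructor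
        · intro h; exact absurd h (by simp)
        · intro h; exact absurd (h i le_rfl hnext) (by simpa using hgt)
      · simp only [gt_iff_lt, hgt, if_false]
        rw [ih (i + 1) hnext (by omega)]
        constructor
        · intro h j hij hj
          rcases Nat.eq_or_lt_of_le hij with rfl | hij'
          · exact le_of_not_gt (by simpa using hgt)
          · exact h j hij' hj
        · intro h j hij hj; exact h j (by omega) hj
    · have : PySem.List.pyGet? s ((i : Int) + 1) = none := by
        rw [PySem.List.pyGet?_eq_none_iff]
        intro hr
        rcases hr with ⟨_, h2⟩
        omega
      rw [this]
      constructor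
      · intro _ j hij hj; omega
      · intro _; rfl

lemma chain_iff_sorted_eq (s : List Char) (hs : s ≠ []) :
    pvScanA s 0 = true ↔ s = PySem.List.sorted s (fun c => c) false := by
  have hlen : 0 < s.length := List.length_pos_iff.mpr hs
  rw [pvScanA_iff s 0 hlen]
  constructor
  · intro h
    have hpw : s.Pairwise (fun a b : Char => a ≤ b) := by
      rw [List.pairwise_iff_getElem]
      intro a b ha hb hab
      -- chain adjacent inequalities from a up to b
      have step : ∀ k (hk : k < s.length) (hak : a ≤ k), s[a] ≤ s[k] := by
        intro k
        induction k with
        | zero =>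
          intro hk hak
          have : a = 0 := Nat.le_zero.mp hak
          subst this; exact le_rfl
        | succ k ihk =>
          intro hk hak
          rcases Nat.eq_or_lt_of_le hak with rfl | hak'
          · exact le_rfl
          · exact le_trans (ihk (by omega) (by omega)) (h k (by omega) hk)
      exact step b hb (by omega)
    exact (PySem.List.sorted_eq_self_of_pairwise s (fun c => c) hpw).symm
  · intro h
    intro j _ hj
    have hpw := PySem.List.sorted_pairwise (xs := s) (key := fun c : Char => c) 
    rw [← h] at hpw
    rw [List.pairwise_iff_getElem] at hpw
    exact hpw j (j + 1) (by omega) hj (by omega)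

lemma per_password (p : Int) :
    pvScanA (PySem.Int.toChars p) 0
      = (let s := PySem.Int.toChars p; s == PySem.List.sorted s (fun c => c) false) := by
  have := chain_iff_sorted_eq (PySem.Int.toChars p) (toChars_ne_nil p)
  simp only []
  cases hscan : pvScanA (PySem.Int.toChars p) 0 with
  | true => exact (beq_iff_eq.mpr (this.mp hscan)).symm
  | false =>
    symm
    rw [beq_eq_false_iff_ne]
    intro heq
    have h2 := this.mpr heq
    rw [hscan] at h2
    simp at h2

lemma foldl_filter (passwords acc : List Int) :
    passwords.foldl
      (fun filtered password =>
        if pvScanA (PySem.Int.toChars password) 0 then filtered ++ [password] else filtered)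
      acc = acc ++ passwords.filter (fun p =>
        let s := PySem.Int.toChars p
        s == PySem.List.sorted s (fun c => c) false) := by
  induction passwords generalizing acc with
  | nil => simp
  | cons p ps ih =>
    simp only [List.foldl_cons, List.filter_cons, per_password p]
    by_cases h : (let s := PySem.Int.toChars p; s == PySem.List.sorted s (fun c => c) false) = true
    · simp only [h, if_true, ih]; simp
    · simp only [Bool.not_eq_true] at h
      simp [h, ih]

-- ===== VERDICT (by name: the statement is the Claim_ definition above) =====
theorem filter_always_increasing_digits_spec : Claim_equal_filter_always_increasing_digits := by
  intro passwords _
  unfold Spec_filter_always_increasing_digits filter_always_increasing_digits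
    filter_always_increasing_digits_alt
  simpa using foldl_filter passwords []
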